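-- pv_equiv track=rewrite | github.com/Friebay/Lithuanian-Word-Square | solver.py | traversal
-- ===== SOURCE A (Python) =====
-- def traversal(n, is_icoordinate):
--   result = []
--   for k in range(n * 2):
--     for j in range(min(k, n), 0, -1):
--       i = k - j
--       if i < n and j <= i:
--         result.append(is_icoordinate * i + j)
--   return result
-- ===== SOURCE B (Python) =====
-- def traversal(n, is_icoordinate):
--     # Two-phase: populate per-diagonal buckets row by row, then flatten in diagonal order.
--     buckets = [[] for _ in range(n * 2)]
--     for i in range(n):
--         for j in range(i, 0, -1):
--             buckets[i + j].append(is_icoordinate * i + j)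
--     result = []
--     for bucket in buckets:
--         result.extend(bucket)
--     return result
-- ===== Notes on version B (the rewrite author's own statement) =====
-- stated objective: alternative
-- what changed: Replaces the diagonal-by-diagonal scan with inner filter by a two-phase row-major traversal that appends each value into a bucket indexed by i+j and then flattens the 2n buckets in order; no per-element membership test remains.
import Mathlib
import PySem

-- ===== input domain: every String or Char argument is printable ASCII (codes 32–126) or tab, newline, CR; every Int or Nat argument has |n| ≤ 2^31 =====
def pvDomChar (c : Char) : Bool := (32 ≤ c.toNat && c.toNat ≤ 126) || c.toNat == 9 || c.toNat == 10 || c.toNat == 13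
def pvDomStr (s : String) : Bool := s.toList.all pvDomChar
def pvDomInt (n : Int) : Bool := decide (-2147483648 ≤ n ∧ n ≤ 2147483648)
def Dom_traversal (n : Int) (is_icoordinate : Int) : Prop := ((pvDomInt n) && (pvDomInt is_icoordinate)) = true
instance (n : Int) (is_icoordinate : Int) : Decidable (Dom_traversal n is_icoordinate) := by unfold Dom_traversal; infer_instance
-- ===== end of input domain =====

-- B replaces the diagonal scan + filter by a populate-buckets-then-flatten two-phase traversal (same cost, different structure).

-- ===== PORT A =====
def traversal (n : Int) (is_icoordinate : Int) : List Int :=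
  (PySem.List.pyRange 0 (n * 2) 1).foldl (fun result k =>
    (PySem.List.pyRange (min k n) 0 (-1)).foldl (fun result j =>
      let i := k - j
      if i < n ∧ j ≤ i then result ++ [is_icoordinate * i + j] else result) result) []

-- ===== PORT B =====
-- 'buckets[i + j].append(x)': in B's loop 0 ≤ i + j < 2*n always holds, so plain set/getD at
-- index (i+j).toNat is exact (no negative-index wraparound, no IndexError arises).
def pvAppendAt (bs : List (List Int)) (t : Int) (x : Int) : List (List Int) :=
  bs.set t.toNat (bs.getD t.toNat [] ++ [x])

def traversal_alt (n : Int) (is_icoordinate : Int) : List Int :=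
  let buckets0 : List (List Int) := (PySem.List.pyRange 0 (n * 2) 1).map (fun _ => [])
  let buckets := (PySem.List.pyRange 0 n 1).foldl (fun bs i =>
    (PySem.List.pyRange i 0 (-1)).foldl (fun bs j =>
      pvAppendAt bs (i + j) (is_icoordinate * i + j)) bs) buckets0
  buckets.foldl (fun result bucket => result ++ bucket) []

-- ===== PRECONDITION & SPEC =====
def Spec_traversal (n : Int) (is_icoordinate : Int) (out : List Int) : Prop := out = traversal_alt n is_icoordinate
instance (n : Int) (is_icoordinate : Int) (out : List Int) : Decidable (Spec_traversal n is_icoordinate out) := by unfold Spec_traversal; infer_instance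

-- ===== CLAIM (what is proved, stated in full; the proofs are below) =====
def Claim_equal_traversal : Prop := ∀ (n : Int) (is_icoordinate : Int), Dom_traversal n is_icoordinate → Spec_traversal n is_icoordinate (traversal n is_icoordinate)

-- ===== LEMMAS AND PROOFS =====

-- the common normal form: diagonal k restricted to rows 0 ≤ i < m, values in i-ascending order
def pvDiag (n ic k m : Int) : List Int :=
  ((PySem.List.pyRange 0 m 1).filter (fun i => decide (1 ≤ k - i ∧ k - i ≤ i))).map
    (fun i => ic * i + (k - i))

-- two filtered unit-step ranges are equal when their predicates select the same integers
theorem pvFilterRangeEq (p q : Int → Bool) (a b c d : Int)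
    (hp : ∀ x : Int, a ≤ x → x < b → p x = true → (c ≤ x ∧ x < d) ∧ q x = true)
    (hq : ∀ x : Int, c ≤ x → x < d → q x = true → (a ≤ x ∧ x < b) ∧ p x = true) :
    (PySem.List.pyRange a b 1).filter p = (PySem.List.pyRange c d 1).filter q := by
  apply PySem.List.eq_of_perm_of_pairwise_le_of_injective (key := fun x : Int => x)
    (fun _ _ h => h)
  · rw [List.perm_ext_iff_of_nodup
      ((PySem.List.nodup_pyRange_one a b).filter p)
      ((PySem.List.nodup_pyRange_one c d).filter q)]
    intro x
    simp only [List.mem_filter, PySem.List.mem_pyRange_one]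
    constructor
    · rintro ⟨⟨h1, h2⟩, h3⟩
      exact ⟨(hp x h1 h2 h3).1, (hp x h1 h2 h3).2⟩
    · rintro ⟨⟨h1, h2⟩, h3⟩
      exact ⟨(hq x h1 h2 h3).1, (hq x h1 h2 h3).2⟩
  · exact ((PySem.List.pairwise_lt_pyRange_one a b).filter p).imp le_of_lt
  · exact ((PySem.List.pairwise_lt_pyRange_one c d).filter q).imp le_of_lt

-- a countdown range mapped through j ↦ k - j is an ascending range
theorem pvMapSubRange (k m : Int) :
    (PySem.List.pyRange m 0 (-1)).map (fun j => k - j) = PySem.List.pyRange (k - m) k 1 := by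
  rw [PySem.List.pyRange_neg_one, PySem.List.pyRange_one, List.map_map]
  have hlen : (m - 0).toNat = (k - (k - m)).toNat := by omega
  rw [hlen]
  exact List.map_congr_left (fun t _ => by simp only [Function.comp_apply]; ring)

-- A's diagonal k equals the normal form (for k inside A's outer range)
theorem pvAlistEq (n ic k : Int) (hk0 : 0 ≤ k) (hk2 : k < n * 2) :
    ((PySem.List.pyRange (min k n) 0 (-1)).filter
        (fun j => decide (k - j < n ∧ j ≤ k - j))).map (fun j => ic * (k - j) + j)
      = pvDiag n ic k n := by
  have h1 : ((PySem.List.pyRange (min k n) 0 (-1)).filter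
      (fun j => decide (k - j < n ∧ j ≤ k - j))).map (fun j => ic * (k - j) + j)
      = ((PySem.List.pyRange (min k n) 0 (-1)).filter
      ((fun x => decide (x < n ∧ k - x ≤ x)) ∘ (fun j : Int => k - j))).map
      ((fun i : Int => ic * i + (k - i)) ∘ (fun j : Int => k - j)) := by
    have hfc : (PySem.List.pyRange (min k n) 0 (-1)).filter
        (fun j => decide (k - j < n ∧ j ≤ k - j))
        = (PySem.List.pyRange (min k n) 0 (-1)).filter
          ((fun x => decide (x < n ∧ k - x ≤ x)) ∘ (fun j : Int => k - j)) := by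
      apply List.filter_congr
      intro j _
      simp only [Function.comp_apply, decide_eq_decide]
      omega
    rw [hfc]
    exact List.map_congr_left (fun j _ => by simp only [Function.comp_apply]; ring)
  rw [h1, ← List.map_map, ← List.filter_map, pvMapSubRange, pvDiag]
  congr 1
  apply pvFilterRangeEq
  · intro x h1 h2 h3
    rw [decide_eq_true_iff] at h3 ⊢
    omega
  · intro x h1 h2 h3
    rw [decide_eq_true_iff] at h3 ⊢
    omega

-- A in normal form
theorem pvTraversalEq (n ic : Int) :
    traversal n ic = (PySem.List.pyRange 0 (n * 2) 1).flatMap (fun k => pvDiag n ic k n) := by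
  unfold traversal
  simp only [PySem.List.foldl_append_ite, PySem.List.foldl_append_eq_flatMap, List.nil_append]
  rw [List.flatMap_def, List.flatMap_def]
  congr 1
  apply List.map_congr_left
  intro k hk
  rw [PySem.List.mem_pyRange_one] at hk
  exact pvAlistEq n ic k hk.1 hk.2

-- pvAppendAt and B's inner loop preserve the bucket-list length
theorem pvAppendAt_length (bs : List (List Int)) (t x : Int) :
    (pvAppendAt bs t x).length = bs.length := by
  simp [pvAppendAt]

theorem pvInnerLength (v : Int → Int) (i : Int) (js : List Int) (bs : List (List Int)) :
    (js.foldl (fun bs j => pvAppendAt bs (i + j) (v j)) bs).length = bs.length := by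
  induction js generalizing bs with
  | nil => rfl
  | cons j rest ih => simp [List.foldl_cons, ih, pvAppendAt_length]

-- pointwise effect of B's inner loop on the buckets
theorem pvInnerGetD (v : Int → Int) (i : Int) (js : List Int) (bs : List (List Int)) (t : Nat)
    (hnd : js.Nodup) (hb : ∀ j ∈ js, 0 ≤ i + j ∧ (i + j).toNat < bs.length) :
    (js.foldl (fun bs j => pvAppendAt bs (i + j) (v j)) bs).getD t []
      = if ∃ j ∈ js, i + j = (t : Int) then bs.getD t [] ++ [v ((t : Int) - i)]
        else bs.getD t [] := by
  induction js generalizing bs with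
  | nil => simp
  | cons j rest ih =>
    rw [List.foldl_cons]
    have hndr := hnd.of_cons
    have hjr : j ∉ rest := (List.nodup_cons.mp hnd).1
    have hbj := hb j (List.mem_cons_self)
    have hbr : ∀ j' ∈ rest, 0 ≤ i + j' ∧ (i + j').toNat < (pvAppendAt bs (i + j) (v j)).length := by
      intro j' hj'
      rw [pvAppendAt_length]
      exact hb j' (List.mem_cons_of_mem _ hj')
    rw [ih (pvAppendAt bs (i + j) (v j)) hndr hbr]
    by_cases h1 : i + j = (t : Int)
    · have h2 : ¬ ∃ j' ∈ rest, i + j' = (t : Int) := by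
        rintro ⟨j', hj', he⟩
        have hjj : j' = j := by omega
        exact hjr (hjj ▸ hj')
      have hc : ∃ j' ∈ j :: rest, i + j' = (t : Int) := ⟨j, List.mem_cons_self, h1⟩
      rw [if_neg h2, if_pos hc]
      have hv : v j = v ((t : Int) - i) := by congr 1; omega
      have htn : (i + j).toNat = t := by omega
      simp only [pvAppendAt, htn]
      rw [List.getD_eq_getElem?_getD, List.getElem?_set_self (by omega : t < bs.length)]
      simp [hv]
    · have htn : (i + j).toNat ≠ t := by omega
      have hset : (pvAppendAt bs (i + j) (v j)).getD t [] = bs.getD t [] := by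
        simp [pvAppendAt, List.getD_eq_getElem?_getD, List.getElem?_set_ne htn]
      rw [hset]
      by_cases h2 : ∃ j' ∈ rest, i + j' = (t : Int)
      · rw [if_pos h2, if_pos ⟨h2.choose, List.mem_cons_of_mem _ h2.choose_spec.1,
          h2.choose_spec.2⟩]
      · have hcc : ¬ ∃ j' ∈ j :: rest, i + j' = (t : Int) := by
          rintro ⟨j', hj', he⟩
          rcases List.mem_cons.mp hj' with rfl | hm
          · exact h1 he
          · exact h2 ⟨j', hm, he⟩
        rw [if_neg h2, if_neg hcc]

-- one more row in the normal form
theorem pvDiagStep (n ic k m : Int) (hm : 0 ≤ m) :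
    pvDiag n ic k (m + 1)
      = pvDiag n ic k m ++ (if 1 ≤ k - m ∧ k - m ≤ m then [ic * m + (k - m)] else []) := by
  unfold pvDiag
  rw [PySem.List.pyRange_one_succ_right hm, List.filter_append, List.map_append]
  by_cases h : 1 ≤ k - m ∧ k - m ≤ m
  · rw [if_pos h]
    have hf : List.filter (fun i => decide (1 ≤ k - i ∧ k - i ≤ i)) [m] = [m] := by
      simp [h.1]; omega
    rw [hf]
    rfl
  · rw [if_neg h]
    have hf : List.filter (fun i => decide (1 ≤ k - i ∧ k - i ≤ i)) [m] = [] := by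
      simp; omega
    rw [hf]
    rfl

-- B's inner loop at row i advances every bucket's normal form from i to i+1
theorem pvInnerStep (n ic i : Int) (h0 : 0 ≤ i) (hi : i < n) :
    (PySem.List.pyRange i 0 (-1)).foldl
        (fun bs j => pvAppendAt bs (i + j) (ic * i + j))
        ((PySem.List.pyRange 0 (n * 2) 1).map (fun k => pvDiag n ic k i))
      = (PySem.List.pyRange 0 (n * 2) 1).map (fun k => pvDiag n ic k (i + 1)) := by
  have hnd : (PySem.List.pyRange i 0 (-1)).Nodup := by
    rw [PySem.List.pyRange_neg_one_eq_reverse]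
    exact List.nodup_reverse.mpr (PySem.List.nodup_pyRange_one _ _)
  have hlen0 : ((PySem.List.pyRange 0 (n * 2) 1).map (fun k => pvDiag n ic k i)).length
      = (n * 2).toNat := by
    rw [List.length_map, PySem.List.length_pyRange_one]; congr 1; omega
  have hb : ∀ j ∈ PySem.List.pyRange i 0 (-1), 0 ≤ i + j ∧
      (i + j).toNat < ((PySem.List.pyRange 0 (n * 2) 1).map (fun k => pvDiag n ic k i)).length := by
    intro j hj
    rw [PySem.List.mem_pyRange_neg_one] at hj
    rw [hlen0]
    omega
  apply List.ext_getElem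
  · rw [pvInnerLength, hlen0, List.length_map, PySem.List.length_pyRange_one]; congr 1; omega
  · intro t ht1 ht2
    have htlt : t < (n * 2).toNat := by rwa [List.length_map, PySem.List.length_pyRange_one,
      (by omega : (n * 2 - 0).toNat = (n * 2).toNat)] at ht2
    have hgetR : ∀ (m : Int), ((PySem.List.pyRange 0 (n * 2) 1).map (fun k => pvDiag n ic k m))[t]'
        (by rw [List.length_map, PySem.List.length_pyRange_one]; omega) = pvDiag n ic (t : Int) m := by
      intro m
      rw [List.getElem_map, PySem.List.getElem_pyRange_one]
      norm_num
    have hL : ((PySem.List.pyRange i 0 (-1)).foldl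
        (fun bs j => pvAppendAt bs (i + j) (ic * i + j))
        ((PySem.List.pyRange 0 (n * 2) 1).map (fun k => pvDiag n ic k i)))[t]'ht1
        = ((PySem.List.pyRange i 0 (-1)).foldl
        (fun bs j => pvAppendAt bs (i + j) (ic * i + j))
        ((PySem.List.pyRange 0 (n * 2) 1).map (fun k => pvDiag n ic k i))).getD t [] := by
      rw [List.getD_eq_getElem?_getD, List.getElem?_eq_getElem ht1]; rfl
    rw [hL, pvInnerGetD (fun j => ic * i + j) i _ _ t hnd hb, hgetR]
    have hcond : (∃ j ∈ PySem.List.pyRange i 0 (-1), i + j = (t : Int))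
        ↔ (1 ≤ (t : Int) - i ∧ (t : Int) - i ≤ i) := by
      constructor
      · rintro ⟨j, hj, he⟩
        rw [PySem.List.mem_pyRange_neg_one] at hj
        omega
      · rintro ⟨h1, h2⟩
        exact ⟨(t : Int) - i, by rw [PySem.List.mem_pyRange_neg_one]; omega, by ring⟩
    have hget0 : ((PySem.List.pyRange 0 (n * 2) 1).map (fun k => pvDiag n ic k i)).getD t []
        = pvDiag n ic (t : Int) i := by
      rw [List.getD_eq_getElem?_getD, List.getElem?_eq_getElem
        (by rw [List.length_map, PySem.List.length_pyRange_one]; omega)]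
      exact hgetR i
    rw [hget0, pvDiagStep n ic (t : Int) i h0]
    by_cases hc : 1 ≤ (t : Int) - i ∧ (t : Int) - i ≤ i
    · rw [if_pos (hcond.mpr hc), if_pos hc]
    · rw [if_neg (fun h => hc (hcond.mp h)), if_neg hc, List.append_nil]

-- B's outer loop up to row m yields the normal-form buckets
theorem pvOuter (n ic : Int) (m : Nat) (hm : (m : Int) ≤ n) :
    (PySem.List.pyRange 0 (m : Int) 1).foldl
        (fun bs i => (PySem.List.pyRange i 0 (-1)).foldl
          (fun bs j => pvAppendAt bs (i + j) (ic * i + j)) bs)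
        ((PySem.List.pyRange 0 (n * 2) 1).map (fun _ => []))
      = (PySem.List.pyRange 0 (n * 2) 1).map (fun k => pvDiag n ic k (m : Int)) := by
  induction m with
  | zero =>
    have h0 : ((0 : Nat) : Int) = 0 := by norm_num
    rw [h0]
    simp only [PySem.List.pyRange_one_eq_nil (le_refl (0 : Int)), List.foldl_nil]
    apply List.map_congr_left
    intro k _
    simp [pvDiag, PySem.List.pyRange_one_eq_nil (le_refl (0 : Int))]
  | succ m ih =>
    have hm' : (m : Int) ≤ n := by push_cast at hm ⊢; omega
    rw [(by push_cast; ring : ((m + 1 : Nat) : Int) = (m : Int) + 1),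
      PySem.List.pyRange_one_succ_right (by omega : (0 : Int) ≤ (m : Int)),
      List.foldl_append, ih hm']
    simp only [List.foldl_cons, List.foldl_nil]
    exact pvInnerStep n ic (m : Int) (by omega) (by push_cast at hm; omega)

-- B in normal form
theorem pvTraversalAltEq (n ic : Int) (hn : 0 < n) :
    traversal_alt n ic
      = (PySem.List.pyRange 0 (n * 2) 1).flatMap (fun k => pvDiag n ic k n) := by
  simp only [traversal_alt]
  have hcast : ((n.toNat : Int)) = n := by omega
  have h := pvOuter n ic n.toNat (by omega)
  rw [hcast] at h
  rw [h, PySem.List.foldl_append_eq_flatten, List.nil_append, List.flatMap_def]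

-- ===== VERDICT (by name: the statement is the Claim_ definition above) =====
theorem traversal_spec : Claim_equal_traversal := by
  intro n ic _
  unfold Spec_traversal
  by_cases hn : 0 < n
  · rw [pvTraversalEq n ic, pvTraversalAltEq n ic hn]
  · unfold traversal traversal_alt
    rw [PySem.List.pyRange_one_eq_nil (by omega : n * 2 ≤ 0),
      PySem.List.pyRange_one_eq_nil (by omega : n ≤ 0)]
    rfl
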